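-- pv_equiv track=rewrite | github.com/Kile/Killua | killua/cogs/web_scraping.py | book_buying_links
-- ===== SOURCE A (Python) =====
-- from typing import List, Union
--
-- def book_buying_links(book: dict) -> List[str]:
--     """Returns a list of links where the book can be bought"""
--     available_to_buy = []
--     if "ia" in book:
--         available_to_buy.append(
--             f"[Internet Archive](https://archive.org/details/{book['ia'][0]})"
--         )
--     if "id_amazon" in book and [i for i in book["id_amazon"] if i]:
--         available_to_buy.append(
--             f"[Amazon](https://www.amazon.com/dp/{[i for i in book['id_amazon'] if i][0]})"
--         )
--     if "worldcat" in book: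
--         available_to_buy.append(
--             f"[WorldCat](https://www.worldcat.org/title/{book['worldcat'][0]})"
--         )
--     if "id_goodreads" in book:
--         available_to_buy.append(
--             f"[Goodreads](https://www.goodreads.com/book/show/{book['id_goodreads'][0]})"
--         )
--     if "id_librarything" in book:
--         available_to_buy.append(
--             f"[LibraryThing](https://www.librarything.com/work/{book['id_librarything'][0]})"
--         )
--     if "id_overdrive" in book:
--         available_to_buy.append(
--             f"[Overdrive](https://www.overdrive.com/media/{book['id_overdrive'][0]})"
--         )
--     return available_to_buy
-- ===== SOURCE B (Python) =====
-- def book_buying_links(book):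
--     """Returns a list of links where the book can be bought.
--
--     Single pass over the book's own items: each recognised source key yields a
--     (rank, link) pair; sorting by rank restores the canonical presentation order.
--     """
--     SPEC = {
--         "ia": (0, "Internet Archive", "https://archive.org/details/"),
--         "id_amazon": (1, "Amazon", "https://www.amazon.com/dp/"),
--         "worldcat": (2, "WorldCat", "https://www.worldcat.org/title/"),
--         "id_goodreads": (3, "Goodreads", "https://www.goodreads.com/book/show/"),
--         "id_librarything": (4, "LibraryThing", "https://www.librarything.com/work/"),
--         "id_overdrive": (5, "Overdrive", "https://www.overdrive.com/media/"),
--     }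
--     found = []
--     for key, ids in book.items():
--         spec = SPEC.get(key)
--         if spec is None:
--             continue
--         rank, label, prefix = spec
--         ident = next((i for i in ids if i), None) if key == "id_amazon" else ids[0]
--         if ident is not None:
--             found.append((rank, f"[{label}]({prefix}{ident})"))
--     found.sort(key=lambda entry: entry[0])
--     return [link for _, link in found]
-- ===== Notes on version B (the rewrite author's own statement) =====
-- stated objective: alternative
-- what changed: Instead of probing six hard-coded keys in a fixed if-chain, B makes a single pass over the book's own items, mapping each recognised key through a SPEC dict to a (rank, link) pair, then sorts by rank and projects the links; the Amazon entry keeps its first-truthy extraction.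
import Mathlib
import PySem

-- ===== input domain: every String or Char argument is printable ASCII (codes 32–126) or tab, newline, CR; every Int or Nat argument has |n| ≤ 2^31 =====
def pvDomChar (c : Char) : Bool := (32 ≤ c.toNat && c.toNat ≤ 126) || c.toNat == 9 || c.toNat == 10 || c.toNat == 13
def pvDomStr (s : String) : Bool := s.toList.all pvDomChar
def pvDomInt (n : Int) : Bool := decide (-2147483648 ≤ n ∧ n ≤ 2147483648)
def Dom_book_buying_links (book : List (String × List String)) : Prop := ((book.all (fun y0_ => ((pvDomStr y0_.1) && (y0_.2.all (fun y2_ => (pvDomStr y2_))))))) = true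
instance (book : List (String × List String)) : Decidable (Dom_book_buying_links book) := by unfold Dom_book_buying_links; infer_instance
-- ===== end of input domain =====

-- B replaces A's fixed if-chain over six keys by one pass over the book's items collecting (rank, link) pairs via a SPEC table, then a sort by rank (objective: alternative).

-- ===== PORT A =====
-- Each Python block 'if key in book: append(f"...{book[key][0]})")' is one ite; book[key][0] is
-- (pyGet? … 0).getD "" — total form of the indexing that raises IndexError on an empty list (excluded by Pre_).
def book_buying_links (book : List (String × List String)) : List String :=
  let d := PySem.Dict.ofList book
  let acc : List String := []
  let acc := if d.contains "ia" then
      acc ++ ["[Internet Archive](https://archive.org/details/" ++ (PySem.List.pyGet? ((d.get? "ia").getD []) 0).getD "" ++ ")"]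
    else acc
  -- if "id_amazon" in book and [i for i in book["id_amazon"] if i]: append with the first truthy id
  let acc := if d.contains "id_amazon" && !(((d.get? "id_amazon").getD []).filter (fun i => i != "")).isEmpty then
      acc ++ ["[Amazon](https://www.amazon.com/dp/" ++ (PySem.List.pyGet? (((d.get? "id_amazon").getD []).filter (fun i => i != "")) 0).getD "" ++ ")"]
    else acc
  let acc := if d.contains "worldcat" then
      acc ++ ["[WorldCat](https://www.worldcat.org/title/" ++ (PySem.List.pyGet? ((d.get? "worldcat").getD []) 0).getD "" ++ ")"]
    else acc
  let acc := if d.contains "id_goodreads" then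
      acc ++ ["[Goodreads](https://www.goodreads.com/book/show/" ++ (PySem.List.pyGet? ((d.get? "id_goodreads").getD []) 0).getD "" ++ ")"]
    else acc
  let acc := if d.contains "id_librarything" then
      acc ++ ["[LibraryThing](https://www.librarything.com/work/" ++ (PySem.List.pyGet? ((d.get? "id_librarything").getD []) 0).getD "" ++ ")"]
    else acc
  let acc := if d.contains "id_overdrive" then
      acc ++ ["[Overdrive](https://www.overdrive.com/media/" ++ (PySem.List.pyGet? ((d.get? "id_overdrive").getD []) 0).getD "" ++ ")"]
    else acc
  acc

-- ===== PORT B =====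
-- SPEC: key -> (rank, label, url prefix)
def pvSpec : PySem.Dict String (Int × String × String) := PySem.Dict.ofList
  [ ("ia", (0, "Internet Archive", "https://archive.org/details/")),
    ("id_amazon", (1, "Amazon", "https://www.amazon.com/dp/")),
    ("worldcat", (2, "WorldCat", "https://www.worldcat.org/title/")),
    ("id_goodreads", (3, "Goodreads", "https://www.goodreads.com/book/show/")),
    ("id_librarything", (4, "LibraryThing", "https://www.librarything.com/work/")),
    ("id_overdrive", (5, "Overdrive", "https://www.overdrive.com/media/")) ]

-- next((i for i in ids if i), None)
def pvFirstTruthy : List String → Option String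
  | [] => none
  | i :: rest => if i != "" then some i else pvFirstTruthy rest

-- the loop body over one (key, ids) item of the book: SPEC.get(key); extract ident; append (rank, link)
def pvCollect (acc : List (Int × String)) (kv : String × List String) : List (Int × String) :=
  match pvSpec.get? kv.1 with
  | none => acc
  | some (rank, label, pre) =>
    match (if kv.1 == "id_amazon" then pvFirstTruthy kv.2 else PySem.List.pyGet? kv.2 0) with
    | some ident => acc ++ [(rank, "[" ++ label ++ "](" ++ pre ++ ident ++ ")")]
    | none => acc

def book_buying_links_alt (book : List (String × List String)) : List String :=
  let d := PySem.Dict.ofList book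
  let found := d.items.foldl pvCollect []
  (PySem.List.sorted found (fun e => e.1)).map (fun e => e.2)

-- ===== PRECONDITION & SPEC =====
-- Pre_ excludes inputs where a non-Amazon source key is present with an EMPTY id list: there Python A (and Python B) raise IndexError on [0].
def Pre_book_buying_links (book : List (String × List String)) : Prop :=
  ∀ k ∈ (["ia", "worldcat", "id_goodreads", "id_librarything", "id_overdrive"] : List String),
    (PySem.Dict.ofList book).get? k ≠ some []
instance (book : List (String × List String)) : Decidable (Pre_book_buying_links book) := by unfold Pre_book_buying_links; infer_instance

def pvWitness_book_buying_links : (List (String × List String)) := [("ia", ["x"]), ("id_amazon", ["", "b0"])]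

def Spec_book_buying_links (book : List (String × List String)) (out : List String) : Prop := out = book_buying_links_alt book
instance (book : List (String × List String)) (out : List String) : Decidable (Spec_book_buying_links book out) := by unfold Spec_book_buying_links; infer_instance

-- ===== CLAIM (what is proved, stated in full; the proofs are below) =====
def Claim_equal_book_buying_links : Prop := ∀ (book : List (String × List String)), Dom_book_buying_links book → Pre_book_buying_links book → Spec_book_buying_links book (book_buying_links book)

-- ===== LEMMAS AND PROOFS =====
def pvSpecKeys : List String := ["ia", "id_amazon", "worldcat", "id_goodreads", "id_librarything", "id_overdrive"]

-- what one item contributes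
def pvG (kv : String × List String) : List (Int × String) := pvCollect [] kv

-- the contribution of one source key, read off the dict
def pvE (d : PySem.Dict String (List String)) (k : String) : List (Int × String) :=
  match d.get? k with
  | some v => pvG (k, v)
  | none => []

lemma pvCollect_eq (acc : List (Int × String)) (kv : String × List String) :
    pvCollect acc kv = acc ++ pvG kv := by
  unfold pvG pvCollect
  cases hs : pvSpec.get? kv.1 with
  | none => simp
  | some t =>
    obtain ⟨r, l, p⟩ := t
    cases hi : (if kv.1 == "id_amazon" then pvFirstTruthy kv.2 else PySem.List.pyGet? kv.2 0) with
    | none => simp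
    | some i => simp

lemma pvG_nil_or_singleton (kv : String × List String) : pvG kv = [] ∨ ∃ x, pvG kv = [x] := by
  unfold pvG pvCollect
  cases pvSpec.get? kv.1 with
  | none => exact Or.inl rfl
  | some t =>
    obtain ⟨r, l, p⟩ := t
    cases (if kv.1 == "id_amazon" then pvFirstTruthy kv.2 else PySem.List.pyGet? kv.2 0) with
    | none => exact Or.inl rfl
    | some i => exact Or.inr ⟨_, rfl⟩

lemma pvG_eq_nil_of_not_mem (kv : String × List String) (h : kv.1 ∉ pvSpecKeys) : pvG kv = [] := by
  have hk : pvSpec.keys = pvSpecKeys := by decide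
  have : pvSpec.get? kv.1 = none := by
    rw [PySem.Dict.get?_eq_none_iff_not_mem_keys, hk]; exact h
  unfold pvG pvCollect
  rw [this]

lemma pvG_rank (kv : String × List String) (r : Int) (l p : String)
    (h : pvSpec.get? kv.1 = some (r, l, p)) : ∀ x ∈ pvG kv, x.1 = r := by
  unfold pvG pvCollect
  rw [h]
  cases (if kv.1 == "id_amazon" then pvFirstTruthy kv.2 else PySem.List.pyGet? kv.2 0) with
  | none => simp
  | some i => simp

lemma foldl_pvCollect (l : List (String × List String)) (acc : List (Int × String)) :
    l.foldl pvCollect acc = acc ++ l.flatMap pvG := by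
  have h : l.foldl pvCollect acc = l.foldl (fun a kv => a ++ pvG kv) acc :=
    PySem.List.foldl_congr_mem l pvCollect (fun a kv => a ++ pvG kv) acc (fun a kv _ => pvCollect_eq a kv)
  rw [h, PySem.List.foldl_append_eq_flatMap]

-- a nodup list of keys turns a "does k match" flatMap into a membership ite
lemma flatMap_ite_of_nodup (ks : List String) (hks : ks.Nodup) (x : String) (ys : List (Int × String)) :
    (ks.flatMap (fun k => if x == k then ys else [])) = if x ∈ ks then ys else [] := by
  induction ks with
  | nil => simp
  | cons a t ih =>
    rcases List.nodup_cons.mp hks with ⟨ha, ht⟩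
    rw [List.flatMap_cons, ih ht]
    by_cases hx : x = a
    · subst hx
      simp [ha]
    · simp [hx]

-- partition the collected pairs by source key (as a permutation)
lemma flatMap_pvG_perm (l : List (String × List String)) :
    (l.flatMap pvG).Perm (pvSpecKeys.flatMap (fun k => (l.filter (fun kv => kv.1 == k)).flatMap pvG)) := by
  induction l with
  | nil => simp
  | cons kv t ih =>
    have h1 : ∀ k ∈ pvSpecKeys,
        ((List.filter (fun kv' => kv'.1 == k) (kv :: t)).flatMap pvG)
          = (if kv.1 == k then pvG kv else []) ++ (t.filter (fun kv' => kv'.1 == k)).flatMap pvG := by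
      intro k _
      by_cases h : kv.1 = k <;> simp [h]
    rw [List.flatMap_congr h1]
    have h2 : (pvSpecKeys.flatMap (fun k => (if kv.1 == k then pvG kv else []) ++ (t.filter (fun kv' => kv'.1 == k)).flatMap pvG)).Perm
        ((pvSpecKeys.flatMap (fun k => if kv.1 == k then pvG kv else [])) ++ pvSpecKeys.flatMap (fun k => (t.filter (fun kv' => kv'.1 == k)).flatMap pvG)) :=
      (List.flatMap_append_perm pvSpecKeys _ _).symm
    have hnd : pvSpecKeys.Nodup := by decide
    rw [flatMap_ite_of_nodup pvSpecKeys hnd kv.1 (pvG kv)] at h2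
    refine List.Perm.trans ?_ h2.symm
    by_cases hm : kv.1 ∈ pvSpecKeys
    · simp only [List.flatMap_cons, hm, if_pos]
      exact (ih.append_left (pvG kv))
    · simp only [List.flatMap_cons, hm, pvG_eq_nil_of_not_mem kv hm]
      simpa using ih

-- with nodup first components, filtering the items on a key yields the get? result
lemma filter_fst_of_mem {l : List (String × List String)} {k : String} {v : List String}
    (hn : (l.map Prod.fst).Nodup) (hm : (k, v) ∈ l) :
    l.filter (fun kv => kv.1 == k) = [(k, v)] := by
  induction l with
  | nil => cases hm
  | cons a t ih =>
    rw [List.map_cons] at hn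
    rcases List.nodup_cons.mp hn with ⟨ha, ht⟩
    rcases List.mem_cons.mp hm with h1 | h1
    · subst h1
      have h0 : t.filter (fun kv => kv.1 == k) = [] := by
        apply List.filter_eq_nil_iff.mpr
        intro kv hkv
        simp only [beq_iff_eq]
        intro he
        exact ha (by simpa [he] using List.mem_map_of_mem (f := Prod.fst) hkv)
      simp [h0]
    · have hak : a.1 ≠ k := by
        intro he
        exact ha (by simpa [he] using List.mem_map_of_mem (f := Prod.fst) h1)
      simp [hak, ih ht h1]

lemma filter_items (d : PySem.Dict String (List String)) (hn : d.keys.Nodup) (k : String) :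
    d.items.filter (fun kv => kv.1 == k)
      = (match d.get? k with | some v => [(k, v)] | none => []) := by
  cases hg : d.get? k with
  | none =>
    apply List.filter_eq_nil_iff.mpr
    intro kv hkv
    simp only [beq_iff_eq]
    intro he
    have : k ∈ d.keys := he ▸ PySem.Dict.mem_keys_of_mem_items d hkv
    rw [PySem.Dict.get?_eq_none_iff_not_mem_keys] at hg
    exact hg this
  | some v =>
    exact filter_fst_of_mem hn (PySem.Dict.mem_items_of_get?_eq_some d hg)

-- B's collected list is, up to permutation, the six per-key contributions
lemma found_perm (d : PySem.Dict String (List String)) (hn : d.keys.Nodup) :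
    (d.items.foldl pvCollect []).Perm (pvSpecKeys.flatMap (pvE d)) := by
  rw [foldl_pvCollect, List.nil_append]
  refine (flatMap_pvG_perm d.items).trans ?_
  have h : ∀ k ∈ pvSpecKeys, ((d.items.filter (fun kv => kv.1 == k)).flatMap pvG) = pvE d k := by
    intro k _
    rw [filter_items d hn k]
    unfold pvE
    cases d.get? k with
    | none => simp
    | some v => simp
  rw [List.flatMap_congr h]

lemma pvE_rank (d : PySem.Dict String (List String)) (k : String) (r : Int) (lab p : String)
    (h : pvSpec.get? k = some (r, lab, p)) : ∀ x ∈ pvE d k, x.1 = r := by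
  unfold pvE
  cases d.get? k with
  | none => simp
  | some v => exact pvG_rank (k, v) r lab p (by simpa using h)

lemma pvE_nil_or_singleton (d : PySem.Dict String (List String)) (k : String) :
    pvE d k = [] ∨ ∃ x, pvE d k = [x] := by
  unfold pvE
  cases d.get? k with
  | none => exact Or.inl rfl
  | some v => exact pvG_nil_or_singleton (k, v)

lemma pairwise_single {l : List (Int × String)} (h : l = [] ∨ ∃ x, l = [x]) :
    l.Pairwise (fun a b : Int × String => a.1 < b.1) := by
  rcases h with h | ⟨x, h⟩ <;> subst h <;> simp

-- the six-block concatenation is pairwise strictly increasing in rank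
lemma target_pairwise (d : PySem.Dict String (List String)) :
    (pvSpecKeys.flatMap (pvE d)).Pairwise (fun a b : Int × String => a.1 < b.1) := by
  have r0 := pvE_rank d "ia" 0 "Internet Archive" "https://archive.org/details/" (by decide)
  have r1 := pvE_rank d "id_amazon" 1 "Amazon" "https://www.amazon.com/dp/" (by decide)
  have r2 := pvE_rank d "worldcat" 2 "WorldCat" "https://www.worldcat.org/title/" (by decide)
  have r3 := pvE_rank d "id_goodreads" 3 "Goodreads" "https://www.goodreads.com/book/show/" (by decide)
  have r4 := pvE_rank d "id_librarything" 4 "LibraryThing" "https://www.librarything.com/work/" (by decide)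
  have r5 := pvE_rank d "id_overdrive" 5 "Overdrive" "https://www.overdrive.com/media/" (by decide)
  have s0 := pairwise_single (pvE_nil_or_singleton d "ia")
  have s1 := pairwise_single (pvE_nil_or_singleton d "id_amazon")
  have s2 := pairwise_single (pvE_nil_or_singleton d "worldcat")
  have s3 := pairwise_single (pvE_nil_or_singleton d "id_goodreads")
  have s4 := pairwise_single (pvE_nil_or_singleton d "id_librarything")
  have s5 := pairwise_single (pvE_nil_or_singleton d "id_overdrive")
  show ((pvE d "ia" ++ (pvE d "id_amazon" ++ (pvE d "worldcat" ++ (pvE d "id_goodreads" ++ (pvE d "id_librarything" ++ (pvE d "id_overdrive" ++ []))))))).Pairwise _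
  simp only [List.append_nil, List.pairwise_append]
  refine ⟨s0, ⟨s1, ⟨s2, ⟨s3, ⟨s4, s5, ?_⟩, ?_⟩, ?_⟩, ?_⟩, ?_⟩ <;>
    intro a ha b hb <;> (try simp only [List.mem_append] at hb ⊢)
  · rw [r4 a ha, r5 b hb]; decide
  · rcases hb with hb | hb
    · rw [r3 a ha, r4 b hb]; decide
    · rw [r3 a ha, r5 b hb]; decide
  · rcases hb with hb | hb | hb
    · rw [r2 a ha, r3 b hb]; decide
    · rw [r2 a ha, r4 b hb]; decide
    · rw [r2 a ha, r5 b hb]; decide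
  · rcases hb with hb | hb | hb | hb
    · rw [r1 a ha, r2 b hb]; decide
    · rw [r1 a ha, r3 b hb]; decide
    · rw [r1 a ha, r4 b hb]; decide
    · rw [r1 a ha, r5 b hb]; decide
  · rcases hb with hb | hb | hb | hb | hb
    · rw [r0 a ha, r1 b hb]; decide
    · rw [r0 a ha, r2 b hb]; decide
    · rw [r0 a ha, r3 b hb]; decide
    · rw [r0 a ha, r4 b hb]; decide
    · rw [r0 a ha, r5 b hb]; decide

lemma pvFirstTruthy_eq_head?_filter (v : List String) :
    pvFirstTruthy v = (v.filter (fun i => i != "")).head? := by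
  induction v with
  | nil => rfl
  | cons x xs ih => by_cases hx : x = "" <;> simp [pvFirstTruthy, hx, ih]

-- one standard A block equals appending the mapped per-key contribution
lemma pvStepStd_eq (d : PySem.Dict String (List String)) (key preA label url : String)
    (hsp : pvSpec.get? key = some (((pvSpec.get? key).getD (0, "", "")).1, label, url))
    (hkey : key ≠ "id_amazon")
    (ho : d.get? key ≠ some [])
    (hs : preA = "[" ++ label ++ "](" ++ url) (acc acc' : List String) (hacc : acc = acc') :
    (if d.contains key then
        acc ++ [preA ++ (PySem.List.pyGet? ((d.get? key).getD []) 0).getD "" ++ ")"]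
      else acc)
    = acc' ++ (pvE d key).map (fun e => e.2) := by
  subst hs hacc
  unfold pvE
  rw [PySem.Dict.contains_eq_isSome_get?]
  cases hg : d.get? key with
  | none => simp
  | some v =>
    rw [hg] at ho
    cases v with
    | nil => exact absurd rfl ho
    | cons x t =>
      unfold pvG pvCollect
      simp only []
      rw [hsp]
      simp [hkey, PySem.List.pyGet?, PySem.List.pyIdx?]

-- the Amazon A block equals appending the mapped Amazon contribution
lemma pvStepAmz_eq (d : PySem.Dict String (List String)) (acc acc' : List String) (hacc : acc = acc') :
    (if d.contains "id_amazon"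
          && !(((d.get? "id_amazon").getD []).filter (fun i => i != "")).isEmpty then
        acc ++ ["[Amazon](https://www.amazon.com/dp/" ++
          (PySem.List.pyGet? (((d.get? "id_amazon").getD []).filter (fun i => i != "")) 0).getD "" ++ ")"]
      else acc)
    = acc' ++ (pvE d "id_amazon").map (fun e => e.2) := by
  subst hacc
  unfold pvE
  rw [PySem.Dict.contains_eq_isSome_get?]
  have hsp : pvSpec.get? "id_amazon" = some (1, "Amazon", "https://www.amazon.com/dp/") := by decide
  cases hg : d.get? "id_amazon" with
  | none => simp
  | some v =>
    unfold pvG pvCollect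
    cases hf : v.filter (fun i => i != "") with
    | nil => simp [hsp, pvFirstTruthy_eq_head?_filter, hf]
    | cons x t =>
      simp [hsp, pvFirstTruthy_eq_head?_filter, hf, PySem.List.pyGet?, PySem.List.pyIdx?]

-- ===== VERDICT (by name: the statement is the Claim_ definition above) =====
theorem book_buying_links_spec : Claim_equal_book_buying_links := by
  intro book _ hpre
  unfold Spec_book_buying_links
  have hn : (PySem.Dict.ofList book).keys.Nodup := PySem.Dict.nodup_keys_ofList book
  -- B's side: the sort lays the collected pairs out in the six-block order
  have hsort : PySem.List.sorted ((PySem.Dict.ofList book).items.foldl pvCollect []) (fun e : Int × String => e.1)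
      = pvSpecKeys.flatMap (pvE (PySem.Dict.ofList book)) :=
    PySem.List.sorted_eq_of_perm_of_pairwise_lt _ _ _ (found_perm _ hn).symm (target_pairwise _)
  have hmap : (pvSpecKeys.flatMap (pvE (PySem.Dict.ofList book))).map (fun e => e.2)
      = ((((([] ++ (pvE (PySem.Dict.ofList book) "ia").map (fun e => e.2)) ++ (pvE (PySem.Dict.ofList book) "id_amazon").map (fun e => e.2))
        ++ (pvE (PySem.Dict.ofList book) "worldcat").map (fun e => e.2)) ++ (pvE (PySem.Dict.ofList book) "id_goodreads").map (fun e => e.2))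
        ++ (pvE (PySem.Dict.ofList book) "id_librarything").map (fun e => e.2)) ++ (pvE (PySem.Dict.ofList book) "id_overdrive").map (fun e => e.2) := by
    simp [pvSpecKeys, List.append_assoc]
  simp only [book_buying_links, book_buying_links_alt]
  rw [hsort, hmap]
  refine pvStepStd_eq _ "id_overdrive" "[Overdrive](https://www.overdrive.com/media/" "Overdrive" "https://www.overdrive.com/media/" (by decide) (by decide) (hpre "id_overdrive" (by simp)) (by decide) _ _ ?_
  refine pvStepStd_eq _ "id_librarything" "[LibraryThing](https://www.librarything.com/work/" "LibraryThing" "https://www.librarything.com/work/" (by decide) (by decide) (hpre "id_librarything" (by simp)) (by decide) _ _ ?_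
  refine pvStepStd_eq _ "id_goodreads" "[Goodreads](https://www.goodreads.com/book/show/" "Goodreads" "https://www.goodreads.com/book/show/" (by decide) (by decide) (hpre "id_goodreads" (by simp)) (by decide) _ _ ?_
  refine pvStepStd_eq _ "worldcat" "[WorldCat](https://www.worldcat.org/title/" "WorldCat" "https://www.worldcat.org/title/" (by decide) (by decide) (hpre "worldcat" (by simp)) (by decide) _ _ ?_
  refine pvStepAmz_eq _ _ _ ?_
  exact pvStepStd_eq _ "ia" "[Internet Archive](https://archive.org/details/" "Internet Archive" "https://archive.org/details/" (by decide) (by decide) (hpre "ia" (by simp)) (by decide) _ _ rfl
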